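-- pv_equiv track=rewrite | github.com/llllssss94/Lets-Study-Code | Programmers/신고 결과 받기/code.py | solution
-- ===== SOURCE A (Python) =====
-- def solution(id_list, report, k):
--     answer = []
--
--     emailed = dict.fromkeys(id_list)
--     reported = dict.fromkeys(id_list)
--
--     for key in id_list:
--         emailed[key] = 0
--         reported[key] = []
--
--     for r in report:
--         _from, _to = r.split(" ")
--         reported[_to].append(_from)
--
--     for _report in reported.values():
--         cnt = set(_report)
--         if len(cnt) >= k:
--             for reporter in cnt:
--                 emailed[reporter] += 1
--
--     answer = list(emailed.values())
--
--     return answer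
-- ===== SOURCE B (Python) =====
-- def solution(id_list, report, k):
--     pairs = {tuple(r.split(" ")) for r in report}   # distinct reports, parsed once
--     counts = {}
--     for f, t in pairs:
--         counts[t] = counts.get(t, 0) + 1            # distinct reporters per target
--     tally = {u: 0 for u in id_list}
--     for f, t in pairs:
--         if counts[t] >= k:
--             tally[f] += 1
--     return list(tally.values())
-- ===== Notes on version B (the rewrite author's own statement) =====
-- stated objective: simpler
-- what changed: Instead of A's per-target accumulation (a dict of reporter lists per target, then a nested loop deduping each target's reporters and incrementing per reporter), B parses and dedups the report pairs once into a global set, builds a distinct-reporter count table in one pass, and tallies emails in one flat pass over the deduped pairs.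
import Mathlib
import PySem

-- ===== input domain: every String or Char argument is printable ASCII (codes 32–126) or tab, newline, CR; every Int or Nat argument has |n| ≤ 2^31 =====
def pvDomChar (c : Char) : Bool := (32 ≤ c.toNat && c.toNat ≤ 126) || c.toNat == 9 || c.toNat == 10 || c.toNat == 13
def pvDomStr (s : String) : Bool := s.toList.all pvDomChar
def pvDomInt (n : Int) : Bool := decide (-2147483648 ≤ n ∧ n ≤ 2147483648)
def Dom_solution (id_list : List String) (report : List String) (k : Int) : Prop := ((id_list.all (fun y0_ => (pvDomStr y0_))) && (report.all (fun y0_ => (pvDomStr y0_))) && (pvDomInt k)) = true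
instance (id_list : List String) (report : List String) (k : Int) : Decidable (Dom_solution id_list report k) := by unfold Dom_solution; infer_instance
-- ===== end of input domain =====

-- B replaces A's per-target accumulation (dict of reporter lists per target + nested dedup/increment loop)
-- by one global deduped set of parsed report pairs, a distinct-reporter count table, and one flat tally pass (objective: simpler).

-- shared parsing helpers (neither port reaches the other through them):
-- r.split(" ") (total; PySem.Str.split? is some for the nonempty separator " ")
def pvSplit (r : String) : List String := (PySem.Str.split? r " ").getD []
-- a two-field split result as a (reporter, target) pair
def pvToPair (p : List String) : Option (String × String) :=
  match p with
  | [f, t] => some (f, t)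
  | _ => none

-- ===== PORT A =====
def solution (id_list : List String) (report : List String) (k : Int) : List Int :=
  -- emailed = dict.fromkeys(id_list); for key in id_list: emailed[key] = 0   (typed: one insert-fold, same keys/order)
  let emailed : PySem.Dict String Int :=
    id_list.foldl (fun d key => d.insert key 0) PySem.Dict.empty
  -- reported = dict.fromkeys(id_list); for key in id_list: reported[key] = []
  let reported : PySem.Dict String (List String) :=
    id_list.foldl (fun d key => d.insert key ([] : List String)) PySem.Dict.empty
  -- for r in report: _from, _to = r.split(" "); reported[_to].append(_from)
  --   (unpack of ≠ 2 fields raises ValueError, a missing key raises KeyError: excluded by Pre_)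
  let reported := report.foldl (fun d r =>
    match PySem.Str.split? r " " with
    | some [f, t] => d.modify t [] (fun l => l ++ [f])
    | _ => d) reported
  -- for _report in reported.values(): cnt = set(_report); if len(cnt) >= k: for reporter in cnt: emailed[reporter] += 1
  --   (a reporter missing from emailed raises KeyError: excluded by Pre_)
  let emailed := reported.values.foldl (fun e rep =>
    let cnt : PySem.Set String := PySem.Set.ofList rep
    if k ≤ PySem.Set.len cnt then
      cnt.foldl (fun e reporter => e.modify reporter 0 (fun n => n + 1)) e
    else e) emailed
  emailed.values

-- ===== PORT B =====
def solution_alt (id_list : List String) (report : List String) (k : Int) : List Int :=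
  -- pairs = {tuple(r.split(" ")) for r in report}
  let pairs : PySem.Set (List String) :=
    PySem.Set.ofList (report.map (fun r => (PySem.Str.split? r " ").getD []))
  -- counts = {}; for f, t in pairs: counts[t] = counts.get(t, 0) + 1   (unpack of ≠ 2 fields raises: excluded by Pre_)
  let counts : PySem.Dict String Int :=
    pairs.foldl (fun c p =>
      match p with
      | [_, t] => c.insert t (c.getD t 0 + 1)
      | _ => c) PySem.Dict.empty
  -- tally = {u: 0 for u in id_list}
  let tally : PySem.Dict String Int :=
    id_list.foldl (fun d u => d.insert u 0) PySem.Dict.empty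
  -- for f, t in pairs: if counts[t] >= k: tally[f] += 1   (a missing tally key raises KeyError: excluded by Pre_)
  let tally := pairs.foldl (fun d p =>
    match p with
    | [f, t] => if k ≤ counts.getD t 0 then d.modify f 0 (fun n => n + 1) else d
    | _ => d) tally
  tally.values

-- ===== PRECONDITION & SPEC =====
-- the distinct reporters of target t, in first-report order
def pvReporters (report : List String) (t : String) : List String :=
  PySem.List.dedup ((report.map pvSplit).filterMap (fun p =>
    (pvToPair p).bind (fun q => if q.2 == t then some q.1 else none)))
-- Pre_ excludes exactly the inputs on which Python A raises: a report entry that does not split on " " into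
-- exactly two fields (ValueError on unpacking), a target not in id_list (KeyError on reported[_to]), or a
-- reporter outside id_list whose target has at least k distinct reporters (KeyError on emailed[reporter]).
def Pre_solution (id_list : List String) (report : List String) (k : Int) : Prop :=
  (report.all (fun r =>
    match pvSplit r with
    | [f, t] => decide (t ∈ id_list) &&
        (if k ≤ ((pvReporters report t).length : Int) then decide (f ∈ id_list) else true)
    | _ => false)) = true
instance (id_list : List String) (report : List String) (k : Int) : Decidable (Pre_solution id_list report k) := by
  unfold Pre_solution; infer_instance
def pvWitness_solution : List String × List String × Int :=
  (["muzi", "frodo", "apeach", "neo"],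
   ["muzi frodo", "apeach frodo", "frodo neo", "muzi neo", "apeach muzi", "muzi frodo"], 2)
def Spec_solution (id_list : List String) (report : List String) (k : Int) (out : List Int) : Prop := out = solution_alt id_list report k
instance (id_list : List String) (report : List String) (k : Int) (out : List Int) : Decidable (Spec_solution id_list report k out) := by unfold Spec_solution; infer_instance

-- ===== CLAIM (what is proved, stated in full; the proofs are below) =====
def Claim_equal_solution : Prop := ∀ (id_list : List String) (report : List String) (k : Int), Dom_solution id_list report k → Pre_solution id_list report k → Spec_solution id_list report k (solution id_list report k)

-- ===== LEMMAS AND PROOFS =====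

def pvQ (report : List String) : List (String × String) :=
  (report.map pvSplit).filterMap pvToPair
def pvDP (report : List String) : List (String × String) :=
  PySem.Set.ofList (pvQ report)
def pvCnt (report : List String) (t : String) : Nat :=
  ((pvDP report).map Prod.snd).count t

lemma pvSplit_some (r : String) : PySem.Str.split? r " " = some (pvSplit r) := by
  simp [pvSplit, PySem.Str.split?, PySem.Chars.split?]

lemma pv_foldl_add_filterMap {α β : Type} [BEq α] [LawfulBEq α] [BEq β] [LawfulBEq β]
    (g : α → Option β) (hg : ∀ a a' b, g a = some b → g a' = some b → a = a') :
    ∀ (l : List α) (s : List α),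
      (l.foldl PySem.Set.add s).filterMap g = (l.filterMap g).foldl PySem.Set.add (s.filterMap g) := by
  intro l
  induction l with
  | nil => intro s; rfl
  | cons x l ih =>
      intro s
      show ((l.foldl PySem.Set.add (PySem.Set.add s x)).filterMap g) = _
      rw [List.filterMap_cons]
      cases hx : g x with
      | none =>
          have : PySem.Set.add s x = s ∨ PySem.Set.add s x = s ++ [x] := by
            unfold PySem.Set.add; split_ifs <;> [exact Or.inl rfl; exact Or.inr rfl]
          rcases this with h | h
          · rw [ih (PySem.Set.add s x), h]
          · rw [ih (PySem.Set.add s x), h]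
            simp [List.filterMap_append, hx]
      | some b =>
          rw [ih (PySem.Set.add s x)]
          show _ = (l.filterMap g).foldl PySem.Set.add (PySem.Set.add (s.filterMap g) b)
          congr 1
          by_cases hmem : x ∈ s
          · have h1 : PySem.Set.add s x = s := by
              simp [PySem.Set.add, PySem.Set.contains, hmem]
            have h2 : b ∈ s.filterMap g := List.mem_filterMap.2 ⟨x, hmem, hx⟩
            rw [h1]
            simp [PySem.Set.add, PySem.Set.contains, h2]
          · have h1 : PySem.Set.add s x = s ++ [x] := by
              simp [PySem.Set.add, PySem.Set.contains, hmem]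
            have h2 : b ∉ s.filterMap g := by
              intro hb
              rcases List.mem_filterMap.1 hb with ⟨a, ha, hga⟩
              exact hmem (hg a x b hga hx ▸ ha)
            rw [h1]
            simp [PySem.Set.add, PySem.Set.contains, List.filterMap_append, hx, h2]

lemma pv_ofList_filterMap {α β : Type} [BEq α] [LawfulBEq α] [BEq β] [LawfulBEq β]
    (g : α → Option β) (hg : ∀ a a' b, g a = some b → g a' = some b → a = a') (l : List α) :
    PySem.Set.ofList (l.filterMap g) = (PySem.Set.ofList l).filterMap g := by
  have := pv_foldl_add_filterMap g hg l []
  simpa [PySem.Set.ofList, PySem.Set.empty] using this.symm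

-- filter-then-map as filterMap
lemma pv_filter_map_fst (l : List (String × String)) (t : String) :
    ((l.filter (fun q => q.2 == t)).map Prod.fst)
      = l.filterMap (fun q => if q.2 == t then some q.1 else none) := by
  induction l with
  | nil => rfl
  | cons q l ih =>
      by_cases h : q.2 = t
      · simp [List.filterMap_cons, h, ih]
      · simp [List.filter_cons, h, ih]

-- (I1)+(I2)+(I3): the distinct reporters of t are the first components of the deduped pairs with target t
lemma pv_toPair_inj : ∀ (a a' : List String) (b : String × String),
    pvToPair a = some b → pvToPair a' = some b → a = a' := by
  intro a a' b ha ha'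
  match a, ha with
  | [f, t], ha =>
    match a', ha' with
    | [f', t'], ha' =>
      simp only [pvToPair, Option.some.injEq] at ha ha'
      rw [← ha'] at ha
      simp only [Prod.mk.injEq] at ha
      rw [ha.1, ha.2]

lemma pv_reporters_eq (report : List String) (t : String) :
    pvReporters report t = ((pvDP report).filter (fun q => q.2 == t)).map Prod.fst := by
  have hcomp : ((report.map pvSplit).filterMap (fun p =>
      (pvToPair p).bind (fun q => if q.2 == t then some q.1 else none)))
      = (pvQ report).filterMap (fun q => if q.2 == t then some q.1 else none) := by
    rw [pvQ, List.filterMap_filterMap]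
  have hinj : ∀ (a a' : String × String) (b : String),
      (if a.2 == t then some a.1 else none) = some b →
      (if a'.2 == t then some a'.1 else none) = some b → a = a' := by
    intro a a' b ha ha'
    by_cases h1 : a.2 = t <;> by_cases h2 : a'.2 = t <;> simp [h1, h2] at ha ha'
    exact Prod.ext (ha ▸ ha'.symm ▸ rfl) (h1.trans h2.symm)
  rw [pvReporters, PySem.List.dedup_eq_ofList, hcomp,
    pv_ofList_filterMap _ hinj, ← pv_filter_map_fst]
  rfl

-- (I4)
lemma pv_reporters_length (report : List String) (t : String) :
    (pvReporters report t).length = pvCnt report t := by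
  rw [pv_reporters_eq, List.length_map, pvCnt, List.count_eq_countP, List.countP_map,
    List.countP_eq_length_filter]
  rfl

-- (I5)
lemma pv_mem_reporters (report : List String) (t key : String) :
    key ∈ pvReporters report t ↔ (key, t) ∈ pvDP report := by
  rw [pv_reporters_eq]
  constructor
  · intro h
    rcases List.mem_map.1 h with ⟨q, hq, hq1⟩
    rcases List.mem_filter.1 hq with ⟨hqD, hq2⟩
    have : q = (key, t) := Prod.ext hq1 (by simpa using hq2)
    exact this ▸ hqD
  · intro h
    exact List.mem_map.2 ⟨(key, t), List.mem_filter.2 ⟨h, by simp⟩, rfl⟩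

lemma pv_update_of_subset {α : Type} [BEq α] [LawfulBEq α] (s : PySem.Set α) (xs : List α)
    (h : ∀ x ∈ xs, x ∈ s) : PySem.Set.update s xs = s := by
  induction xs generalizing s with
  | nil => rfl
  | cons x xs ih =>
      have hx : x ∈ s := h x (by simp)
      have hadd : PySem.Set.add s x = s := by
        simp [PySem.Set.add, PySem.Set.contains, hx]
      show PySem.Set.update (PySem.Set.add s x) xs = s
      rw [hadd]; exact ih s (fun y hy => h y (by simp [hy]))

lemma pv_length_eq_of_nodup {α : Type} [DecidableEq α] {l₁ l₂ : List α}
    (h₁ : l₁.Nodup) (h₂ : l₂.Nodup) (h : ∀ x, x ∈ l₁ ↔ x ∈ l₂) : l₁.length = l₂.length := by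
  rw [← List.toFinset_card_of_nodup h₁, ← List.toFinset_card_of_nodup h₂]
  congr 1; ext x; simp [h x]

-- A's report loop, rewritten as a loop over the parsed pairs
lemma pv_foldA (report : List String) (d : PySem.Dict String (List String)) :
    report.foldl (fun d r =>
      match PySem.Str.split? r " " with
      | some [f, t] => d.modify t [] (fun l => l ++ [f])
      | _ => d) d
    = (pvQ report).foldl (fun d q => d.modify q.2 [] (fun l => l ++ [q.1])) d := by
  induction report generalizing d with
  | nil => rfl
  | cons r report ih =>
      show _ = ((r :: report).map pvSplit |>.filterMap pvToPair).foldl _ d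
      rw [List.map_cons, List.filterMap_cons]
      rw [List.foldl_cons, pvSplit_some r]
      match hp : pvSplit r with
      | [] => simpa [pvToPair, pvQ] using ih d
      | [f] => simpa [pvToPair, pvQ] using ih d
      | [f, t] => simpa [pvToPair, pvQ] using ih (d.modify t [] (fun l => l ++ [f]))
      | f :: t :: c :: rest => simpa [pvToPair, pvQ] using ih d

-- getD over the pair loop
lemma pv_getD_pairfold (Q : List (String × String)) (d : PySem.Dict String (List String)) (t : String) :
    (Q.foldl (fun d q => d.modify q.2 [] (fun l => l ++ [q.1])) d).getD t []
      = d.getD t [] ++ (Q.filter (fun q => q.2 == t)).map Prod.fst := by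
  have h := PySem.Dict.getD_foldl_modify_append (Q.map Prod.swap) d t
  rw [List.foldl_map] at h
  simpa [List.filter_map, Function.comp, List.map_map] using h

-- all stored values of the zero-initialised dict are the default
lemma pv_getD_init {ν : Type} (l : List String) (v : ν) :
    ∀ (d : PySem.Dict String ν) (key : String), d.getD key v = v →
      ((l.foldl (fun d x => d.insert x v) d).getD key v) = v := by
  induction l with
  | nil => intro d key h; exact h
  | cons x l ih =>
      intro d key h
      exact ih (d.insert x v) key (by rw [PySem.Dict.getD_insert]; split_ifs <;> [rfl; exact h])

lemma pv_keys_init {ν : Type} (l : List String) (v : ν) :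
    ((l.foldl (fun d x => d.insert x v) PySem.Dict.empty : PySem.Dict String ν)).keys
      = PySem.Set.ofList l := by
  rw [PySem.Dict.keys_foldl_insert l (fun _ _ => v) PySem.Dict.empty]
  simp [PySem.Dict.keys_empty, PySem.Set.update, PySem.Set.ofList, PySem.Set.empty]

-- A's email loop: value at each key
lemma pv_outerA_getD (k : Int) (reps : List (List String)) :
    ∀ (e : PySem.Dict String Int) (key : String),
    (reps.foldl (fun e rep =>
      if k ≤ PySem.Set.len (PySem.Set.ofList rep) then
        (PySem.Set.ofList rep).foldl (fun e reporter => e.modify reporter 0 (fun n => n + 1)) e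
      else e) e).getD key 0
    = e.getD key 0 + (reps.map (fun rep =>
        if k ≤ PySem.Set.len (PySem.Set.ofList rep) then
          (((PySem.Set.ofList rep : List String).count key : Int)) else 0)).sum := by
  induction reps with
  | nil => intro e key; simp
  | cons rep reps ih =>
      intro e key
      rw [List.foldl_cons, List.map_cons, List.sum_cons]
      by_cases h : k ≤ PySem.Set.len (PySem.Set.ofList rep)
      · simp only [h, if_true]
        rw [ih, PySem.Dict.getD_foldl_modify_add_one]
        ring
      · simp only [h, if_false]
        rw [ih]
        ring

-- A's email loop: keys are untouched when every incremented reporter is already a key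
lemma pv_outerA_keys (k : Int) (reps : List (List String)) :
    ∀ (e : PySem.Dict String Int),
    (∀ rep ∈ reps, k ≤ PySem.Set.len (PySem.Set.ofList rep) →
      ∀ x ∈ (PySem.Set.ofList rep : List String), x ∈ e.keys) →
    (reps.foldl (fun e rep =>
      if k ≤ PySem.Set.len (PySem.Set.ofList rep) then
        (PySem.Set.ofList rep).foldl (fun e reporter => e.modify reporter 0 (fun n => n + 1)) e
      else e) e).keys = e.keys := by
  induction reps with
  | nil => intro e _; rfl
  | cons rep reps ih =>
      intro e h
      rw [List.foldl_cons]
      by_cases hc : k ≤ PySem.Set.len (PySem.Set.ofList rep)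
      · simp only [hc, if_true]
        have hk : ((PySem.Set.ofList rep : List String).foldl
            (fun e reporter => e.modify reporter 0 (fun n => n + 1)) e).keys = e.keys := by
          rw [PySem.Dict.keys_foldl_modify _ 0 (fun _ _ v => v + 1) e]
          exact pv_update_of_subset e.keys _ (fun x hx => h rep (by simp) hc x hx)
        rw [ih _ (fun rep' hr hc' x hx => by rw [hk]; exact h rep' (by simp [hr]) hc' x hx)]
        exact hk
      · simp only [hc, if_false]
        exact ih _ (fun rep' hr hc' x hx => h rep' (by simp [hr]) hc' x hx)

-- B's counts loop as a counting fold over the targets of the deduped pairs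
lemma pv_foldB1 (D : List (List String)) :
    ∀ (c : PySem.Dict String Int),
    D.foldl (fun c p =>
      match p with
      | [_, t] => c.insert t (c.getD t 0 + 1)
      | _ => c) c
    = ((D.filterMap pvToPair).map Prod.snd).foldl (fun c t => c.insert t (c.getD t 0 + 1)) c := by
  induction D with
  | nil => intro c; rfl
  | cons p D ih =>
      intro c
      rw [List.foldl_cons, List.filterMap_cons]
      match p with
      | [] => simpa [pvToPair] using ih c
      | [f] => simpa [pvToPair] using ih c
      | [f, t] => simpa [pvToPair] using ih (c.insert t (c.getD t 0 + 1))
      | f :: t :: x :: rest => simpa [pvToPair] using ih c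

-- B's tally loop: value at each key
lemma pv_foldB2_getD (k : Int) (counts : PySem.Dict String Int) (D : List (List String)) :
    ∀ (d : PySem.Dict String Int) (key : String),
    (D.foldl (fun d p =>
      match p with
      | [f, t] => if k ≤ counts.getD t 0 then d.modify f 0 (fun n => n + 1) else d
      | _ => d) d).getD key 0
    = d.getD key 0 + ((D.filterMap pvToPair).map (fun q =>
        if k ≤ counts.getD q.2 0 ∧ q.1 = key then (1 : Int) else 0)).sum := by
  induction D with
  | nil => intro d key; simp
  | cons p D ih =>
      intro d key
      rw [List.foldl_cons, List.filterMap_cons]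
      match p with
      | [] => simpa [pvToPair] using ih d key
      | [f] => simpa [pvToPair] using ih d key
      | f :: t :: x :: rest => simpa [pvToPair] using ih d key
      | [f, t] =>
          rw [show pvToPair [f, t] = some (f, t) from rfl]
          simp only [List.map_cons, List.sum_cons]
          by_cases hc : k ≤ counts.getD t 0
          · simp only [hc, if_true]
            rw [ih, PySem.Dict.getD_modify]
            by_cases hk : key = f
            · simp [hk, hc]; ring
            · have hfk : ¬ f = key := fun h => hk h.symm
              simp [hk, hfk]
          · simp only [hc, if_false]
            rw [ih]
            simp [hc]

-- B's tally loop: keys are untouched when every tallied reporter is already a key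
lemma pv_foldB2_keys (k : Int) (counts : PySem.Dict String Int) (D : List (List String)) :
    ∀ (d : PySem.Dict String Int),
    (∀ p ∈ D, ∀ f t, p = [f, t] → k ≤ counts.getD t 0 → f ∈ d.keys) →
    (D.foldl (fun d p =>
      match p with
      | [f, t] => if k ≤ counts.getD t 0 then d.modify f 0 (fun n => n + 1) else d
      | _ => d) d).keys = d.keys := by
  induction D with
  | nil => intro d _; rfl
  | cons p D ih =>
      intro d h
      rw [List.foldl_cons]
      match p with
      | [] => exact ih d (fun p' hp' => h p' (by simp [hp']))
      | [f] => exact ih d (fun p' hp' => h p' (by simp [hp']))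
      | f :: t :: x :: rest => exact ih d (fun p' hp' => h p' (by simp [hp']))
      | [f, t] =>
          by_cases hc : k ≤ counts.getD t 0
          · simp only [hc, if_true]
            have hk : (d.modify f 0 (fun n => n + 1)).keys = d.keys := by
              rw [PySem.Dict.keys_modify, PySem.Dict.keys_insert_of_contains]
              rw [PySem.Dict.contains_iff_mem_keys]
              exact h [f, t] (by simp) f t rfl hc
            rw [ih _ (fun p' hp' f' t' hp'' hc' => by
              rw [hk]; exact h p' (by simp [hp']) f' t' hp'' hc')]
            exact hk
          · simp only [hc, if_false]
            exact ih d (fun p' hp' => h p' (by simp [hp']))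

-- the central exchange: summing per target over the id set = summing per deduped pair
lemma pv_count_swap (k : Int) (c : String → Int) (key : String) (U : List String)
    (DP : List (String × String)) (hU : U.Nodup) (hDP : DP.Nodup)
    (hmem : ∀ q ∈ DP, q.2 ∈ U) :
    (U.map (fun t => if k ≤ c t ∧ (key, t) ∈ DP then (1 : Int) else 0)).sum
      = (DP.map (fun q => if k ≤ c q.2 ∧ q.1 = key then (1 : Int) else 0)).sum := by
  have h1 : (U.map (fun t => if k ≤ c t ∧ (key, t) ∈ DP then (1 : Int) else 0)).sum
      = (U.countP (fun t => decide (k ≤ c t ∧ (key, t) ∈ DP)) : Int) := by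
    rw [← PySem.List.sum_map_ite_one_zero (fun t => decide (k ≤ c t ∧ (key, t) ∈ DP)) U]
    congr 1; apply List.map_congr_left; intro t _; simp
  have h2 : (DP.map (fun q => if k ≤ c q.2 ∧ q.1 = key then (1 : Int) else 0)).sum
      = (DP.countP (fun q => decide (k ≤ c q.2 ∧ q.1 = key)) : Int) := by
    rw [← PySem.List.sum_map_ite_one_zero (fun q => decide (k ≤ c q.2 ∧ q.1 = key)) DP]
    congr 1; apply List.map_congr_left; intro q _; simp
  rw [h1, h2]
  congr 1
  rw [List.countP_eq_length_filter, List.countP_eq_length_filter]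
  rw [← List.length_map (f := fun t => (key, t))
    (as := U.filter (fun t => decide (k ≤ c t ∧ (key, t) ∈ DP)))]
  apply pv_length_eq_of_nodup
  · exact List.Nodup.map (fun a b h => by simpa using h) (List.Nodup.filter _ hU)
  · exact List.Nodup.filter _ hDP
  · rintro ⟨a, b⟩
    constructor
    · intro hx
      rcases List.mem_map.1 hx with ⟨t, ht, hteq⟩
      rcases List.mem_filter.1 ht with ⟨htU, hcond⟩
      simp only [decide_eq_true_eq] at hcond
      obtain ⟨h3, h4⟩ := hcond
      obtain ⟨rfl, rfl⟩ : key = a ∧ t = b := by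
        simpa [Prod.ext_iff] using hteq
      exact List.mem_filter.2 ⟨h4, by simpa using h3⟩
    · intro hx
      rcases List.mem_filter.1 hx with ⟨hab, hcond⟩
      simp only [decide_eq_true_eq] at hcond
      obtain ⟨h3, h4⟩ := hcond
      subst h4
      exact List.mem_map.2 ⟨b, List.mem_filter.2 ⟨hmem _ hab, by simpa using ⟨h3, hab⟩⟩, rfl⟩


lemma pv_pre_fact (id_list report : List String) (k : Int) (h : Pre_solution id_list report k) :
    ∀ q ∈ pvQ report, q.2 ∈ id_list ∧
      (k ≤ ((pvReporters report q.2).length : Int) → q.1 ∈ id_list) := by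
  intro q hq
  rcases List.mem_filterMap.1 hq with ⟨p, hp, hpt⟩
  rcases List.mem_map.1 hp with ⟨r, hr, rfl⟩
  have hall := (List.all_eq_true.1 h) r hr
  match hsp : pvSplit r with
  | [] => rw [hsp] at hall; simp at hall
  | [f] => rw [hsp] at hall; simp at hall
  | f :: t :: x :: rest => rw [hsp] at hall; simp at hall
  | [f, t] =>
      rw [hsp] at hall hpt
      simp only [pvToPair, Option.some.injEq] at hpt
      subst hpt
      simp only [Bool.and_eq_true, decide_eq_true_eq] at hall
      refine ⟨hall.1, fun hk => ?_⟩
      have := hall.2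
      rw [if_pos hk] at this
      simpa using this

lemma pv_reporters_eq_Q (report : List String) (t : String) :
    pvReporters report t
      = PySem.Set.ofList (((pvQ report).filter (fun q => q.2 == t)).map Prod.fst) := by
  rw [pvReporters, PySem.List.dedup_eq_ofList, ← List.filterMap_filterMap, ← pvQ,
    ← pv_filter_map_fst]

-- characterisation of port A
lemma pv_A_char (id_list report : List String) (k : Int) (h : Pre_solution id_list report k) :
    solution id_list report k
      = (PySem.Set.ofList id_list : List String).map (fun key =>
          ((PySem.Set.ofList id_list : List String).map (fun t =>
            if k ≤ ((pvReporters report t).length : Int) ∧ (key, t) ∈ pvDP report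
            then (1 : Int) else 0)).sum) := by
  have hpre := pv_pre_fact id_list report k h
  simp only [solution]
  rw [pv_foldA]
  -- the reported dict after the report loop
  set R0 : PySem.Dict String (List String) :=
    id_list.foldl (fun d key => d.insert key ([] : List String)) PySem.Dict.empty with hR0
  set RF : PySem.Dict String (List String) :=
    (pvQ report).foldl (fun d q => d.modify q.2 [] (fun l => l ++ [q.1])) R0 with hRF
  have hR0keys : R0.keys = PySem.Set.ofList id_list := pv_keys_init id_list []
  have hUnodup : (PySem.Set.ofList id_list : List String).Nodup := PySem.Set.nodup_ofList id_list
  have hRFkeys : RF.keys = PySem.Set.ofList id_list := by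
    rw [hRF, PySem.Dict.keys_foldl_modify_key (pvQ report) Prod.snd []
      (fun _ q l => l ++ [q.1]) R0, hR0keys]
    exact pv_update_of_subset _ _ (fun t ht => by
      rcases List.mem_map.1 ht with ⟨q, hq, rfl⟩
      exact (PySem.Set.mem_ofList id_list q.2).2 (hpre q hq).1)
  have hRFgetD : ∀ t, RF.getD t []
      = ((pvQ report).filter (fun q => q.2 == t)).map Prod.fst := by
    intro t
    rw [hRF, pv_getD_pairfold]
    have hz : R0.getD t [] = [] := by
      rw [hR0]; exact pv_getD_init id_list [] PySem.Dict.empty t (by simp)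
    rw [hz, List.nil_append]
  have hRFvalues : RF.values = (PySem.Set.ofList id_list : List String).map
      (fun t => ((pvQ report).filter (fun q => q.2 == t)).map Prod.fst) := by
    rw [PySem.Dict.values_eq_map_keys RF (hRFkeys ▸ hUnodup) [], hRFkeys]
    exact List.map_congr_left (fun t _ => hRFgetD t)
  set E0 : PySem.Dict String Int :=
    id_list.foldl (fun d key => d.insert key 0) PySem.Dict.empty with hE0
  have hE0keys : E0.keys = PySem.Set.ofList id_list := pv_keys_init id_list 0
  -- membership hypothesis for the email loop
  have hrepmem : ∀ rep ∈ RF.values, k ≤ PySem.Set.len (PySem.Set.ofList rep) →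
      ∀ x ∈ (PySem.Set.ofList rep : List String), x ∈ E0.keys := by
    intro rep hrep hk x hx
    rw [hRFvalues] at hrep
    rcases List.mem_map.1 hrep with ⟨t, _, rfl⟩
    rw [← pv_reporters_eq_Q] at hk hx
    have hkey : (x, t) ∈ pvQ report :=
      (PySem.Set.mem_ofList _ _).1 ((pv_mem_reporters report t x).1 hx)
    have := (hpre _ hkey).2 (by simpa [PySem.Set.len] using hk)
    rw [hE0keys]
    exact (PySem.Set.mem_ofList id_list x).2 this
  have hEFkeys := pv_outerA_keys k RF.values E0 hrepmem
  rw [PySem.Dict.values_eq_map_keys _ (hEFkeys ▸ hE0keys ▸ hUnodup) 0, hEFkeys, hE0keys]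
  apply List.map_congr_left
  intro key _
  rw [pv_outerA_getD]
  have hz : E0.getD key 0 = 0 := by
    rw [hE0]; exact pv_getD_init id_list 0 PySem.Dict.empty key (by simp)
  rw [hz, zero_add, hRFvalues, List.map_map]
  congr 1
  apply List.map_congr_left
  intro t _
  simp only [Function.comp]
  rw [← pv_reporters_eq_Q]
  have hnd : (pvReporters report t).Nodup := by
    rw [pv_reporters_eq_Q]; exact PySem.Set.nodup_ofList _
  have hcnt : List.count key (pvReporters report t)
      = if (key, t) ∈ pvDP report then 1 else 0 := by
    simp [List.Nodup.count hnd, pv_mem_reporters]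
  rw [hcnt]
  simp only [PySem.Set.len]
  by_cases h1 : k ≤ ((pvReporters report t).length : Int)
  · by_cases h2 : (key, t) ∈ pvDP report <;> simp [h1, h2]
  · simp [h1]

-- characterisation of port B
lemma pv_B_char (id_list report : List String) (k : Int) (h : Pre_solution id_list report k) :
    solution_alt id_list report k
      = (PySem.Set.ofList id_list : List String).map (fun key =>
          ((pvDP report).map (fun q =>
            if k ≤ ((pvReporters report q.2).length : Int) ∧ q.1 = key
            then (1 : Int) else 0)).sum) := by
  have hpre := pv_pre_fact id_list report k h
  have hUnodup : (PySem.Set.ofList id_list : List String).Nodup := PySem.Set.nodup_ofList id_list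
  simp only [solution_alt]
  rw [show (fun r => (PySem.Str.split? r " ").getD []) = pvSplit from rfl]
  set DL : List (List String) := PySem.Set.ofList (report.map pvSplit) with hDL
  have hDPL : DL.filterMap pvToPair = pvDP report := by
    rw [hDL, pvDP, pvQ, ← pv_ofList_filterMap pvToPair pv_toPair_inj]
  set counts : PySem.Dict String Int := DL.foldl (fun c p =>
      match p with
      | [_, t] => c.insert t (c.getD t 0 + 1)
      | _ => c) PySem.Dict.empty with hcounts
  have hcget : ∀ t, counts.getD t 0 = ((pvReporters report t).length : Int) := by
    intro t
    rw [hcounts, pv_foldB1, List.foldl_map, pv_reporters_length, pvCnt]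
    have h2 := PySem.Dict.getD_foldl_insert_add_one ((DL.filterMap pvToPair).map Prod.snd)
      (PySem.Dict.empty) t
    rw [List.foldl_map] at h2
    rw [h2, hDPL]
    simp
  set T0 : PySem.Dict String Int :=
    id_list.foldl (fun d u => d.insert u 0) PySem.Dict.empty with hT0
  have hT0keys : T0.keys = PySem.Set.ofList id_list := pv_keys_init id_list 0
  have hmem : ∀ p ∈ DL, ∀ f t, p = [f, t] → k ≤ counts.getD t 0 → f ∈ T0.keys := by
    intro p hp f t hpt hk
    subst hpt
    have hL : [f, t] ∈ report.map pvSplit := (PySem.Set.mem_ofList _ _).1 hp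
    have hq : (f, t) ∈ pvQ report := List.mem_filterMap.2 ⟨[f, t], hL, rfl⟩
    rw [hcget] at hk
    have := (hpre _ hq).2 hk
    rw [hT0keys]
    exact (PySem.Set.mem_ofList id_list f).2 this
  have hkeys := pv_foldB2_keys k counts DL T0 hmem
  rw [PySem.Dict.values_eq_map_keys _ (hkeys ▸ hT0keys ▸ hUnodup) 0, hkeys, hT0keys]
  apply List.map_congr_left
  intro key _
  rw [pv_foldB2_getD, hDPL]
  have hz : T0.getD key 0 = 0 := by
    rw [hT0]; exact pv_getD_init id_list 0 PySem.Dict.empty key (by simp)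
  rw [hz, zero_add]
  congr 1
  apply List.map_congr_left
  intro q _
  simp [hcget]

-- ===== VERDICT (by name: the statement is the Claim_ definition above) =====
theorem solution_spec : Claim_equal_solution := by
  intro id_list report k _ hpre
  unfold Spec_solution
  rw [pv_A_char id_list report k hpre, pv_B_char id_list report k hpre]
  apply List.map_congr_left
  intro key _
  refine pv_count_swap k (fun t => ((pvReporters report t).length : Int)) key _ (pvDP report)
    (PySem.Set.nodup_ofList id_list) (by rw [pvDP]; exact PySem.Set.nodup_ofList (pvQ report))
    (fun q hq => (PySem.Set.mem_ofList id_list q.2).2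
      ((pv_pre_fact id_list report k hpre q ((PySem.Set.mem_ofList _ _).1 hq)).1))
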